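-- pv_equiv track=rewrite | github.com/kh277/BOJ | 백준/Gold/15824. 너 봄에는 캡사이신이 맛있단다/너 봄에는 캡사이신이 맛있단다.py | solve
-- ===== SOURCE A (Python) =====
-- MOD = 1000000007
--
-- def solve(N, A):
--     A.sort()
--     result = 0
--     accSum = 0
--     startI = 0
--     endI = N-1
--     for i in range(1, N):
--         accSum += A[endI] - A[startI]
--         result = (result + pow(2, i-1, MOD) * accSum) % MOD
--         startI += 1
--         endI -= 1
--
--     return result
-- ===== SOURCE B (Python) =====
-- MOD = 1000000007
--
-- def solve(N, A):
--     # Same in-place sort as A; result proved equal on the return value.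
--     A.sort()
--     result = 0
--     for j in range(N):
--         result = (result + A[j] * (pow(2, j, MOD) - pow(2, N - 1 - j, MOD))) % MOD
--     return result
-- ===== Notes on version B (the rewrite author's own statement) =====
-- stated objective: simpler
-- what changed: Replaces A's two-pointer cumulative accSum loop (state: result, accSum, startI, endI) by a single pass that adds each sorted element's closed-form contribution A[j]*(2^j - 2^(N-1-j)) mod p; Pre_ additionally excludes the corner N == 1 with empty A, where A returns 0 from its empty loop but B's indexing raises IndexError.
-- outside the precondition, e.g. on solve(1, []): A returns 0, B raises IndexError
import Mathlib
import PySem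

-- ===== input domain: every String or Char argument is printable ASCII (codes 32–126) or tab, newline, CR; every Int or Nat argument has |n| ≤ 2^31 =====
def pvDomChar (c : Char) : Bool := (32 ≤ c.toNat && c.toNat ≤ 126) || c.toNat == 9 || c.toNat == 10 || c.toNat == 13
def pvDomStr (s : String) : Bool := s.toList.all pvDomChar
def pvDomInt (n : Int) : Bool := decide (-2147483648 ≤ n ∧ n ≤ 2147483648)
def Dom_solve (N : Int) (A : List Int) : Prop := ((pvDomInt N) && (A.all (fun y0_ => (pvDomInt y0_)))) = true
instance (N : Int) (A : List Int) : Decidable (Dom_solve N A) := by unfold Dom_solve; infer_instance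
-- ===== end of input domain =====

-- B replaces A's two-pointer cumulative-sum loop by one pass over closed-form
-- per-element coefficients (objective: simpler). Both Pythons sort A in place;
-- the equivalence proved here is about the return value.

-- ===== PORT A =====
-- A[idx] is ported as pyGetD _ idx 0; under Pre_solve every index the loop reads
-- is in range, so the default is never read.
def solve (N : Int) (A : List Int) : Int :=
  let L := PySem.List.sorted A (fun x => x) false
  let st := (PySem.List.pyRange 1 N 1).foldl
    (fun (st : Int × Int × Int × Int) i =>
      let result := st.1
      let accSum := st.2.1
      let startI := st.2.2.1
      let endI := st.2.2.2
      let accSum := accSum + (PySem.List.pyGetD L endI 0 - PySem.List.pyGetD L startI 0)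
      -- pow(2, i-1, MOD): i ≥ 1 inside the range, so the exponent (i-1).toNat is exact
      let result := PySem.Int.mod
        (result + PySem.Int.powMod 2 (i - 1).toNat 1000000007 * accSum) 1000000007
      (result, accSum, startI + 1, endI - 1))
    (0, 0, 0, N - 1)
  st.1

-- ===== PORT B =====
def solve_alt (N : Int) (A : List Int) : Int :=
  let L := PySem.List.sorted A (fun x => x) false
  (PySem.List.pyRange 0 N 1).foldl
    (fun result j =>
      -- exponents j and N-1-j are ≥ 0 for j in range(N), so .toNat is exact
      PySem.Int.mod
        (result + PySem.List.pyGetD L j 0 *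
          (PySem.Int.powMod 2 j.toNat 1000000007 -
           PySem.Int.powMod 2 (N - 1 - j).toNat 1000000007)) 1000000007)
    0

-- ===== PRECONDITION & SPEC =====
-- Pre_ excludes the inputs where the Python A raises IndexError (N ≥ 2 with N > len(A))
-- and the corner N = 1 with A = [], where A returns 0 from its empty loop but B's
-- natural one-pass indexing raises IndexError.
def Pre_solve (N : Int) (A : List Int) : Prop := N ≤ (A.length : Int) ∨ N ≤ 0
instance (N : Int) (A : List Int) : Decidable (Pre_solve N A) := by unfold Pre_solve; infer_instance
def pvWitness_solve : Int × List Int := (3, [5, -2, 9])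

def Spec_solve (N : Int) (A : List Int) (out : Int) : Prop := out = solve_alt N A
instance (N : Int) (A : List Int) (out : Int) : Decidable (Spec_solve N A out) := by unfold Spec_solve; infer_instance

-- ===== CLAIM (what is proved, stated in full; the proofs are below) =====
def Claim_equal_solve : Prop := ∀ (N : Int) (A : List Int), Dom_solve N A → Pre_solve N A → Spec_solve N A (solve N A)

-- ===== LEMMAS AND PROOFS =====

-- accumulated sum of A's loop after t iterations over the sorted list L
def pvS (L : List Int) (N : Int) (t : Nat) : Int :=
  ∑ k ∈ Finset.range t,
    (PySem.List.pyGetD L (N - 1 - (k : Int)) 0 - PySem.List.pyGetD L (k : Int) 0)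

-- (x % p + (y % p) * s) % p = (x + y * s) % p  — A's per-step reduction
lemma pv_mod_step (x y s : Int) :
    (x % 1000000007 + y % 1000000007 * s) % 1000000007 = (x + y * s) % 1000000007 :=
  (Int.ModEq.add (Int.emod_emod_of_dvd x dvd_rfl : (x % 1000000007) ≡ x [ZMOD 1000000007])
    (Int.ModEq.mul (Int.emod_emod_of_dvd y dvd_rfl : (y % 1000000007) ≡ y [ZMOD 1000000007])
      (Int.ModEq.refl s)))

-- (x % p + t) % p = (x + t) % p  — B's per-step reduction
lemma pv_mod_step' (x t : Int) :
    (x % 1000000007 + t) % 1000000007 = (x + t) % 1000000007 :=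
  Int.ModEq.add (Int.emod_emod_of_dvd x dvd_rfl : (x % 1000000007) ≡ x [ZMOD 1000000007])
    (Int.ModEq.refl t)

-- characterization of A's fold after m steps
lemma pv_aloop (L : List Int) (N : Int) (m : Nat) :
    ((List.range m).map (fun (k : Nat) => (1:Int) + (k:Int))).foldl
      (fun (st : Int × Int × Int × Int) i =>
        let result := st.1
        let accSum := st.2.1
        let startI := st.2.2.1
        let endI := st.2.2.2
        let accSum := accSum + (PySem.List.pyGetD L endI 0 - PySem.List.pyGetD L startI 0)
        let result := PySem.Int.mod
          (result + PySem.Int.powMod 2 (i - 1).toNat 1000000007 * accSum) 1000000007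
        (result, accSum, startI + 1, endI - 1))
      (0, 0, 0, N - 1)
    = ((∑ i ∈ Finset.range m, 2 ^ i * pvS L N (i + 1)) % 1000000007,
       pvS L N m, (m : Int), N - 1 - m) := by
  induction m with
  | zero => simp [pvS]
  | succ m ih =>
    rw [List.range_succ, List.map_append, List.foldl_append, ih]
    simp only [List.map_cons, List.map_nil, List.foldl_cons, List.foldl_nil]
    have he : ((1:Int) + (m:Int) - 1).toNat = m := by omega
    have hpow : ∀ e : Nat, PySem.Int.powMod 2 e 1000000007 = 2 ^ e % 1000000007 := by
      intro e
      simp [PySem.Int.powMod]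
    have hS : pvS L N m +
        (PySem.List.pyGetD L (N - 1 - (m:Int)) 0 - PySem.List.pyGetD L (m:Int) 0)
        = pvS L N (m + 1) := by
      simp only [pvS]; rw [Finset.sum_range_succ]
    simp only [he, hpow, PySem.Int.mod_eq_emod_of_pos (by norm_num : (0:Int) < 1000000007),
      hS, Prod.mk.injEq]
    and_intros
    · rw [Finset.sum_range_succ, pv_mod_step]
    all_goals first | (push_cast; ring) | trivial

-- characterization of B's fold after m steps
lemma pv_bloop (L : List Int) (N : Int) (m : Nat) :
    ((List.range m).map (fun (k : Nat) => (0:Int) + (k:Int))).foldl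
      (fun result j =>
        PySem.Int.mod
          (result + PySem.List.pyGetD L j 0 *
            (PySem.Int.powMod 2 j.toNat 1000000007 -
             PySem.Int.powMod 2 (N - 1 - j).toNat 1000000007)) 1000000007)
      0
    = (∑ j ∈ Finset.range m,
        PySem.List.pyGetD L (j : Int) 0 *
          (2 ^ j % 1000000007 - 2 ^ (N - 1 - (j : Int)).toNat % 1000000007)) % 1000000007 := by
  induction m with
  | zero => simp
  | succ m ih =>
    rw [List.range_succ, List.map_append, List.foldl_append, ih]
    simp only [List.map_cons, List.map_nil, List.foldl_cons, List.foldl_nil]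
    have h0 : ((0:Int) + (m:Int)) = (m:Int) := by ring
    have ht : ((m:Int)).toNat = m := by omega
    have hpow : ∀ e : Nat, PySem.Int.powMod 2 e 1000000007 = 2 ^ e % 1000000007 := by
      intro e
      simp [PySem.Int.powMod]
    simp only [h0, ht, hpow, PySem.Int.mod_eq_emod_of_pos (by norm_num : (0:Int) < 1000000007)]
    rw [Finset.sum_range_succ, pv_mod_step']

-- swap of summation: Σ_{i<m} 2^i Σ_{k≤i} d k = Σ_{k<m} d k (2^m - 2^k)
lemma pv_swap (d : Nat → Int) (m : Nat) :
    ∑ i ∈ Finset.range m, 2 ^ i * (∑ k ∈ Finset.range (i + 1), d k)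
    = ∑ k ∈ Finset.range m, d k * (2 ^ m - 2 ^ k) := by
  induction m with
  | zero => simp
  | succ m ih =>
    rw [Finset.sum_range_succ, ih, Finset.sum_range_succ (f := fun k => d k * (2 ^ (m+1) - 2 ^ k))]
    rw [Finset.sum_range_succ (f := d), mul_add, Finset.mul_sum, ← add_assoc, ← Finset.sum_add_distrib]
    have : ∀ k, d k * (2 ^ m - 2 ^ k) + 2 ^ m * d k = d k * (2 ^ (m+1) - 2 ^ k) := by
      intro k; rw [pow_succ]; ring
    simp only [this]
    ring

-- the integer identity between A's sum and B's (unreduced) sum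
lemma pv_identity (h : Nat → Int) (n : Nat) (hn : 1 ≤ n) :
    ∑ i ∈ Finset.range (n - 1), 2 ^ i * (∑ k ∈ Finset.range (i + 1), (h (n - 1 - k) - h k))
    = ∑ j ∈ Finset.range n, h j * (2 ^ j - 2 ^ (n - 1 - j)) := by
  rw [pv_swap]
  have hext : ∑ k ∈ Finset.range (n - 1), (h (n - 1 - k) - h k) * ((2:Int) ^ (n - 1) - 2 ^ k)
      = ∑ k ∈ Finset.range n, (h (n - 1 - k) - h k) * ((2:Int) ^ (n - 1) - 2 ^ k) := by
    conv_rhs => rw [show n = (n - 1) + 1 by omega, Finset.sum_range_succ]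
    simp
  rw [hext]
  have hrefl : ∑ k ∈ Finset.range n, h (n - 1 - k) * ((2:Int) ^ (n - 1) - 2 ^ k)
      = ∑ j ∈ Finset.range n, h j * ((2:Int) ^ (n - 1) - 2 ^ (n - 1 - j)) := by
    rw [← Finset.sum_range_reflect (fun k => h (n - 1 - k) * ((2:Int) ^ (n - 1) - 2 ^ k)) n]
    refine Finset.sum_congr rfl (fun j hj => ?_)
    have hj' := Finset.mem_range.mp hj
    rw [show n - 1 - (n - 1 - j) = j by omega]
  calc ∑ k ∈ Finset.range n, (h (n - 1 - k) - h k) * ((2:Int) ^ (n - 1) - 2 ^ k)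
      = (∑ k ∈ Finset.range n, h (n - 1 - k) * ((2:Int) ^ (n - 1) - 2 ^ k))
        - ∑ k ∈ Finset.range n, h k * ((2:Int) ^ (n - 1) - 2 ^ k) := by
        rw [← Finset.sum_sub_distrib]; exact Finset.sum_congr rfl (fun k _ => by ring)
    _ = _ := by
        rw [hrefl, ← Finset.sum_sub_distrib]
        exact Finset.sum_congr rfl (fun j _ => by ring)

-- B's reduced-coefficient sum agrees with the unreduced one mod p
lemma pv_bsum_mod (h : Nat → Int) (n : Nat) :
    (∑ j ∈ Finset.range n, h j * (2 ^ j % 1000000007 - 2 ^ (n - 1 - j) % 1000000007)) % 1000000007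
    = (∑ j ∈ Finset.range n, h j * ((2:Int) ^ j - 2 ^ (n - 1 - j))) % 1000000007 := by
  rw [Finset.sum_int_mod,
      Finset.sum_int_mod (f := fun j => h j * ((2:Int) ^ j - 2 ^ (n - 1 - j)))]
  congr 1
  refine Finset.sum_congr rfl (fun j _ => ?_)
  exact Int.ModEq.mul (Int.ModEq.refl (h j))
    (Int.ModEq.sub
      (Int.emod_emod_of_dvd _ dvd_rfl : ((2:Int) ^ j % 1000000007) ≡ 2 ^ j [ZMOD 1000000007])
      (Int.emod_emod_of_dvd _ dvd_rfl :
        ((2:Int) ^ (n - 1 - j) % 1000000007) ≡ 2 ^ (n - 1 - j) [ZMOD 1000000007]))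

-- ===== VERDICT (by name: the statement is the Claim_ definition above) =====
theorem solve_spec : Claim_equal_solve := by
  intro N A _ _
  unfold Spec_solve
  by_cases hN : N ≤ 0
  · simp only [solve, solve_alt,
      PySem.List.pyRange_one_eq_nil (by omega : N ≤ 1),
      PySem.List.pyRange_one_eq_nil (by omega : N ≤ 0), List.foldl_nil]
  · set L := PySem.List.sorted A (fun x => x) false with hL
    set n : Nat := N.toNat with hn
    have hn1 : 1 ≤ n := by omega
    have hrange1 : PySem.List.pyRange 1 N 1
        = (List.range (n - 1)).map (fun (k : Nat) => (1:Int) + (k:Int)) := by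
      rw [PySem.List.pyRange_one, show (N - 1).toNat = n - 1 by omega]
    have hrange0 : PySem.List.pyRange 0 N 1
        = (List.range n).map (fun (k : Nat) => (0:Int) + (k:Int)) := by
      rw [PySem.List.pyRange_one, show (N - 0).toNat = n by omega]
    have h1 : solve N A
        = (((List.range (n - 1)).map (fun (k : Nat) => (1:Int) + (k:Int))).foldl
            (fun (st : Int × Int × Int × Int) i =>
              let result := st.1
              let accSum := st.2.1
              let startI := st.2.2.1
              let endI := st.2.2.2
              let accSum := accSum +
                (PySem.List.pyGetD L endI 0 - PySem.List.pyGetD L startI 0)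
              let result := PySem.Int.mod
                (result + PySem.Int.powMod 2 (i - 1).toNat 1000000007 * accSum) 1000000007
              (result, accSum, startI + 1, endI - 1))
            (0, 0, 0, N - 1)).1 := by
      rw [← hrange1]; rfl
    have h2 : solve_alt N A
        = ((List.range n).map (fun (k : Nat) => (0:Int) + (k:Int))).foldl
            (fun result j =>
              PySem.Int.mod
                (result + PySem.List.pyGetD L j 0 *
                  (PySem.Int.powMod 2 j.toNat 1000000007 -
                   PySem.Int.powMod 2 (N - 1 - j).toNat 1000000007)) 1000000007)
            0 := by
      rw [← hrange0]; rfl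
    rw [h1, h2, pv_aloop L N (n - 1), pv_bloop L N n]
    simp only []
    -- both sides are now sums mod p; bridge through Nat-indexed sums
    have hScast : ∀ i ∈ Finset.range (n - 1),
        (2:Int) ^ i * pvS L N (i + 1)
        = 2 ^ i * (∑ k ∈ Finset.range (i + 1),
            (PySem.List.pyGetD L ((n - 1 - k : Nat) : Int) 0 - PySem.List.pyGetD L (k : Int) 0)) := by
      intro i hi
      have hi' := Finset.mem_range.mp hi
      congr 1
      rw [pvS]
      refine Finset.sum_congr rfl (fun k hk => ?_)
      have hk' := Finset.mem_range.mp hk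
      rw [show N - 1 - (k : Int) = ((n - 1 - k : Nat) : Int) by omega]
    have hEcast : ∀ j ∈ Finset.range n,
        PySem.List.pyGetD L (j : Int) 0 *
          ((2:Int) ^ j % 1000000007 - 2 ^ (N - 1 - (j : Int)).toNat % 1000000007)
        = PySem.List.pyGetD L (j : Int) 0 *
          ((2:Int) ^ j % 1000000007 - 2 ^ (n - 1 - j) % 1000000007) := by
      intro j hj
      have hj' := Finset.mem_range.mp hj
      rw [show (N - 1 - (j : Int)).toNat = n - 1 - j by omega]
    rw [Finset.sum_congr rfl hScast, Finset.sum_congr rfl hEcast,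
        pv_bsum_mod (fun k => PySem.List.pyGetD L (k : Int) 0) n,
        ← pv_identity (fun k => PySem.List.pyGetD L (k : Int) 0) n hn1]
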